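-- pv_equiv track=rewrite | github.com/pypi-data/pypi-mirror-197 | packages/lafhterlearn/lafhterlearn-0.7.0-py3-none-any.whl/lafhterlearn/ngrams.py | data_to_write
-- ===== SOURCE A (Python) =====
-- import itertools
--
-- def data_to_write(ngrams_with_counts):
--     pos = 0
--     for context, sparse_array in group_by_contexts(ngrams_with_counts):
--         start = pos
--         end = pos + len(sparse_array)
--         address = (start, end)
--         pos += len(sparse_array)
--         yield context, address, sparse_array
--
-- def group_by_contexts(ngrams_with_counts):
--     groups = itertools.groupby(ngrams_with_counts, key=lambda t: t[0][:-1])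
--
--     for context, grouper in groups:
--         counts = []
--         for ngram, count in grouper:
--             token = ngram[-1]
--             counts.append((token, count))
--         yield context, counts
-- ===== SOURCE B (Python) =====
-- import itertools
--
-- def data_to_write(ngrams_with_counts):
--     # 1) materialize all consecutive-run groups in one pass
--     groups = []
--     cur_key = None
--     cur_counts = None
--     for ngram, count in ngrams_with_counts:
--         key = ngram[:-1]
--         if cur_counts is not None and key == cur_key:
--             cur_counts.append((ngram[-1], count))
--         else:
--             if cur_counts is not None:
--                 groups.append((cur_key, cur_counts))
--             cur_key, cur_counts = key, [(ngram[-1], count)]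
--     if cur_counts is not None:
--         groups.append((cur_key, cur_counts))
--     # 2) prefix-sum offset table instead of a threaded pos counter
--     offsets = [0] + list(itertools.accumulate(len(counts) for _, counts in groups))
--     # 3) zip groups with their address ranges
--     for (context, counts), start, end in zip(groups, offsets, offsets[1:]):
--         yield context, (start, end), counts
-- ===== Notes on version B (the rewrite author's own statement) =====
-- stated objective: alternative
-- what changed: Replaces itertools.groupby plus a threaded pos accumulator with a single flush-on-key-change scan that materializes all groups, then a prefix-sum offset table (itertools.accumulate) zipped with the groups to form the address ranges.
-- outside the precondition, e.g. on data_to_write([((), 1)]): A raises IndexError, B raises IndexError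
import Mathlib
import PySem

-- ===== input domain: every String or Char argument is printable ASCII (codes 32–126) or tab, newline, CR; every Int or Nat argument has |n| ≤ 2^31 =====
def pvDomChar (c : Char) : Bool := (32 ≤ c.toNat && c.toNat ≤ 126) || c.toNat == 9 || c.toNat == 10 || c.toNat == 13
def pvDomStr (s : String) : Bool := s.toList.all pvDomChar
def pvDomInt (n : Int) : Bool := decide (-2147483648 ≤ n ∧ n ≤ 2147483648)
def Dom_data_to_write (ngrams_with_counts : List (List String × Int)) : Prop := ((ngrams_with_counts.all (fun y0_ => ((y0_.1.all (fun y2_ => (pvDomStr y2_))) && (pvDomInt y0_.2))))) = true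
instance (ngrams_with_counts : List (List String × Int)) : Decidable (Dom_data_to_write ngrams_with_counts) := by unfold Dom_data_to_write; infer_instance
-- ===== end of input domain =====

-- B replaces A's itertools.groupby + threaded pos counter by a flush-on-key-change scan that
-- materializes the groups and a prefix-sum offset table zipped with them (alternative decomposition,
-- same cost). Both generators are compared as the list of yielded values.

-- ===== PORT A =====
-- key = t[0][:-1]
def pvAKey (ng : List String) : List String := PySem.List.slice ng none (some (-1))
-- ngram[-1]; Pre_ guarantees ng ≠ [], so the default "" is never used under Pre_
def pvATok (ng : List String) : String := PySem.List.pyGetD ng (-1) ""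
-- itertools.groupby over consecutive runs of equal key, inner loop building counts
def pvGroupByContexts : List (List String × Int) → List (List String × List (String × Int))
  | [] => []
  | (ng, c) :: rest =>
    (pvAKey ng,
      ((ng, c) :: rest.takeWhile (fun p => pvAKey p.1 == pvAKey ng)).map (fun p => (pvATok p.1, p.2))) ::
      pvGroupByContexts (rest.dropWhile (fun p => pvAKey p.1 == pvAKey ng))
  termination_by l => l.length
  decreasing_by exact Nat.lt_succ_of_le (List.length_dropWhile_le _ _)

-- the generator loop of data_to_write, threading pos
def pvALoop (pos : Int) : List (List String × List (String × Int)) → List (List String × (Int × Int) × (List (String × Int)))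
  | [] => []
  | (ctx, sa) :: rest => (ctx, (pos, pos + sa.length), sa) :: pvALoop (pos + (sa.length : Int)) rest

def data_to_write (ngrams_with_counts : List (List String × Int)) : List (List String × (Int × Int) × (List (String × Int))) :=
  pvALoop 0 (pvGroupByContexts ngrams_with_counts)

-- ===== PORT B =====
def pvBKey (ng : List String) : List String := PySem.List.slice ng none (some (-1))
def pvBTok (ng : List String) : String := PySem.List.pyGetD ng (-1) ""
-- the scan loop with the currently open group (cur_key, cur_counts), flushed on key change
def pvBScan (cur : List String × List (String × Int)) : List (List String × Int) → List (List String × List (String × Int))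
  | [] => [cur]
  | (ng, c) :: rest =>
    if pvBKey ng == cur.1 then pvBScan (cur.1, cur.2 ++ [(pvBTok ng, c)]) rest
    else cur :: pvBScan (pvBKey ng, [(pvBTok ng, c)]) rest

def pvBGroups : List (List String × Int) → List (List String × List (String × Int))
  | [] => []
  | (ng, c) :: rest => pvBScan (pvBKey ng, [(pvBTok ng, c)]) rest

-- itertools.accumulate of the group lengths (p = running sum so far)
def pvBAccum (p : Int) : List (List String × List (String × Int)) → List Int
  | [] => []
  | (_, cs) :: rest => (p + (cs.length : Int)) :: pvBAccum (p + (cs.length : Int)) rest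

def data_to_write_alt (ngrams_with_counts : List (List String × Int)) : List (List String × (Int × Int) × (List (String × Int))) :=
  let groups := pvBGroups ngrams_with_counts
  let offsets : List Int := 0 :: pvBAccum 0 groups
  List.zipWith (fun g se => (g.1, se, g.2)) groups (offsets.zip (offsets.drop 1))

-- ===== PRECONDITION & SPEC =====
-- Pre_ excludes inputs containing an empty ngram tuple: there the Python A (and B) raises IndexError on ngram[-1].
def Pre_data_to_write (ngrams_with_counts : List (List String × Int)) : Prop :=
  ∀ p ∈ ngrams_with_counts, p.1 ≠ []
instance (ngrams_with_counts : List (List String × Int)) : Decidable (Pre_data_to_write ngrams_with_counts) := by unfold Pre_data_to_write; infer_instance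
def pvWitness_data_to_write : (List (List String × Int)) := [(["a", "x"], 1), (["a", "y"], 2), (["b", "z"], 3)]
def Spec_data_to_write (ngrams_with_counts : List (List String × Int)) (out : List (List String × (Int × Int) × (List (String × Int)))) : Prop := out = data_to_write_alt ngrams_with_counts
instance (ngrams_with_counts : List (List String × Int)) (out : List (List String × (Int × Int) × (List (String × Int)))) : Decidable (Spec_data_to_write ngrams_with_counts out) := by unfold Spec_data_to_write; infer_instance

-- ===== CLAIM (what is proved, stated in full; the proofs are below) =====
def Claim_equal_data_to_write : Prop := ∀ (ngrams_with_counts : List (List String × Int)), Dom_data_to_write ngrams_with_counts → Pre_data_to_write ngrams_with_counts → Spec_data_to_write ngrams_with_counts (data_to_write ngrams_with_counts)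

-- ===== LEMMAS AND PROOFS =====

-- B's scan with an open group (k, acc) produces exactly A's groupby output:
-- it extends acc with the maximal run of key k, then continues as pvGroupByContexts.
theorem pvScan_eq (l : List (List String × Int)) : ∀ (k : List String) (acc : List (String × Int)),
    pvBScan (k, acc) l =
      (k, acc ++ (l.takeWhile (fun p => pvAKey p.1 == k)).map (fun p => (pvATok p.1, p.2))) ::
        pvGroupByContexts (l.dropWhile (fun p => pvAKey p.1 == k)) := by
  induction l with
  | nil => intro k acc; simp [pvBScan, pvGroupByContexts]
  | cons hd tl ih =>
    intro k acc
    obtain ⟨ng, c⟩ := hd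
    by_cases h : pvAKey ng == k
    · simp only [pvBScan, pvBKey, pvBTok, pvAKey, pvATok] at *
      rw [if_pos h]
      rw [ih]
      simp [h]
    · simp only [pvBScan, pvBKey, pvBTok, pvAKey, pvATok] at *
      rw [if_neg h]
      rw [ih (PySem.List.slice ng none (some (-1))) [(PySem.List.pyGetD ng (-1) "", c)]]
      simp [h, pvGroupByContexts, pvAKey, pvATok]

theorem pvGroups_eq (l : List (List String × Int)) : pvBGroups l = pvGroupByContexts l := by
  cases l with
  | nil => simp [pvBGroups, pvGroupByContexts]
  | cons hd tl =>
    obtain ⟨ng, c⟩ := hd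
    show pvBScan (pvBKey ng, [(pvBTok ng, c)]) tl = _
    rw [show pvBKey ng = pvAKey ng from rfl, show pvBTok ng = pvATok ng from rfl, pvScan_eq]
    simp [pvGroupByContexts]

-- zipping the groups with the prefix-sum offsets equals A's pos-threading loop
theorem pvZip_eq (gs : List (List String × List (String × Int))) : ∀ (p : Int),
    List.zipWith (fun (g : List String × List (String × Int)) (se : Int × Int) => (g.1, se, g.2))
      gs ((p :: pvBAccum p gs).zip (pvBAccum p gs)) = pvALoop p gs := by
  induction gs with
  | nil => intro p; rfl
  | cons g t ih =>
    intro p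
    obtain ⟨ctx, cs⟩ := g
    simp only [pvBAccum, pvALoop, List.zip_cons_cons, List.zipWith_cons_cons]
    rw [ih]

-- ===== VERDICT (by name: the statement is the Claim_ definition above) =====
theorem data_to_write_spec : Claim_equal_data_to_write := by
  intro l _ _
  unfold Spec_data_to_write data_to_write data_to_write_alt
  rw [pvGroups_eq]
  simp only [List.drop_succ_cons, List.drop_zero]
  exact (pvZip_eq _ 0).symm
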